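-- pv_equiv track=rewrite | github.com/lasernite/6fop | quiz_2/quiz.py | cherrypick
-- ===== SOURCE A (Python) =====
-- def cherrypick( A, n, required_sum ):
--
-- 	# edge cases
-- 	if len(A) == n:
-- 		if sum(A) == required_sum:
-- 			return True
-- 		else:
-- 			return False
--
-- 	if len(A) - 1 == n:
-- 		for num in A:
-- 			B = A[:]
-- 			B.remove(num)
-- 			if sum(B) == required_sum:
-- 				return True
-- 		return False
--
-- 	# recursive solution
-- 	C = A[:]
-- 	for first_current in C:
-- 		solution = recurse(C,n,required_sum,[],first_current,set())
-- 		if solution[0] == True: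
-- 			return True
--
-- 	return False
--
-- def recurse(A,n,required_sum,elements,current,searched):
-- 	# recursion depth should stop once n elements have been selected
-- 	if len(elements) == n:
-- 		# if it's the right value, return True
-- 		if sum(elements) == required_sum:
-- 			return True, elements
-- 		# otherwise
-- 		else:
-- 			#print 'dog'
-- 			#print elements
-- 			return False, elements
-- 	elif len(A) == 0:
-- 		# exhausted
-- 		#print 'cat'
-- 		return False
-- 	# otherwise remove current keep recursing on all remaining
-- 	else:
-- 		B = A[:]
-- 		# add current to elements searched
-- 		new_elements = elements[:]
-- 		new_elements.append(current)
-- 		# remove term now being searched from possibilities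
-- 		B.remove(current)
--
-- 		# if set(new_elements) in searched:
-- 		# 	print 'catdog'
-- 		# 	return False, elements
-- 		# else:
-- 			#recurse all remaining
-- 		for new_current in B:
-- 			# update search history to prune
-- 			# print new_elements
-- 			# print searched
-- 			# searched.update((new_elements))
-- 			# print searched
-- 			#print searched
--
-- 			a = recurse(B,n,required_sum,new_elements,new_current,searched)
-- 			# some depth returned true
-- 			if a[0] == True:
-- 				return True, elements
-- 			# no recursion returned true
-- 			#print 'horse'
-- 			#print elements
-- 		return False, elements
-- ===== SOURCE B (Python) =====
-- def cherrypick(A, n, required_sum):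
--     if n < 0 or n > len(A):
--         return False
--     m = len(A)
--     sums = {0: {0}}
--     seen = 0
--     for x in A:
--         seen += 1
--         rem = m - seen
--         new = {}
--         for c in range(max(0, n - rem), min(seen, n) + 1):
--             new[c] = sums.get(c, set()) | {s + x for s in sums.get(c - 1, set())}
--         sums = new
--     return required_sum in sums.get(n, set())
-- ===== Notes on version B (the rewrite author's own statement) =====
-- stated objective: alternative
-- what changed: A searches ordered selections recursively (copying the list and removing the current element at each level); B is a one-pass DP keeping, per feasible count of chosen elements, the set of reachable sums, pruning counts that can no longer reach n with the elements left.
import Mathlib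
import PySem

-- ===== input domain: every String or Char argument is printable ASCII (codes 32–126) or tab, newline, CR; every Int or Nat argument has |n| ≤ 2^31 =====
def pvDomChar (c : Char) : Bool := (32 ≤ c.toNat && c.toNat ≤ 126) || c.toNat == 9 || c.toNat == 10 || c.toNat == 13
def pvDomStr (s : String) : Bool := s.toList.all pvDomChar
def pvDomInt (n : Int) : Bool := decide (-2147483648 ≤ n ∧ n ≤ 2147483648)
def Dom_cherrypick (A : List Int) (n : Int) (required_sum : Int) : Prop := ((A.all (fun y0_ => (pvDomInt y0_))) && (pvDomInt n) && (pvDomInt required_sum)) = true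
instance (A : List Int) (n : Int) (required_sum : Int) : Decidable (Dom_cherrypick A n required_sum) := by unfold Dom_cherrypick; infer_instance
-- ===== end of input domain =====

-- B replaces A's ordered recursive search by a one-pass DP keeping, per feasible count of chosen elements, the set of reachable sums; equivalence of RETURN values is proved (neither program observably mutates its arguments).

-- ===== PORT A =====
-- port of A's helper `recurse`; the `none` arm of the match is where Python's B.remove(current)
-- would raise ValueError, and the `A = []` arm returns a bare `False` in Python — both are
-- unreachable from `cherrypick` (current is always a member of a nonempty A).
def recurse (A : List Int) (n : Int) (required_sum : Int) (elements : List Int) (current : Int) : Bool × List Int :=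
  if (elements.length : Int) = n then
    (decide (elements.sum = required_sum), elements)
  else if A = [] then
    (false, elements)
  else
    match h : PySem.List.remove? A current with  -- h is used by the decreasing_by proof
    | none => (false, elements)
    | some B =>
      if B.any (fun new_current => (recurse B n required_sum (elements ++ [current]) new_current).fst) then
        (true, elements)
      else
        (false, elements)
termination_by A.length
decreasing_by
  have hmem : current ∈ A := by
    by_contra hc
    rw [(PySem.List.remove?_eq_none_iff (xs := A) (v := current)).2 hc] at h
    simp at h
  have := PySem.List.remove?_eq_some_erase (xs := A) (v := current) hmem
  rw [this] at h
  cases h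
  have : (A.erase current).length < A.length := by
    rw [List.length_erase_of_mem hmem]
    cases A with
    | nil => cases hmem
    | cons a l => simp
  exact this

def cherrypick (A : List Int) (n : Int) (required_sum : Int) : Bool :=
  if (A.length : Int) = n then
    decide (A.sum = required_sum)
  else if (A.length : Int) - 1 = n then
    -- for num in A: B = A[:]; B.remove(num); if sum(B) == required_sum: return True
    A.any (fun num =>
      match PySem.List.remove? A num with
      | some B => decide (B.sum = required_sum)
      | none => false)  -- unreachable: num ∈ A, so remove never raises
  else
    A.any (fun first_current => (recurse A n required_sum [] first_current).fst)

-- ===== PORT B =====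
def cherrypick_alt (A : List Int) (n : Int) (required_sum : Int) : Bool :=
  if n < 0 ∨ n > (A.length : Int) then false
  else
    let m : Int := (A.length : Int)
    let st := A.foldl
      (fun (st : PySem.Dict Int (PySem.Set Int) × Int) x =>
        let sums := st.1
        let seen := st.2 + 1
        let rem := m - seen
        let new := (PySem.List.pyRange (max 0 (n - rem)) (min seen n + 1) 1).foldl
          (fun new c => new.insert c
            (PySem.Set.union (sums.getD c PySem.Set.empty)
              (PySem.Set.ofList ((sums.getD (c - 1) PySem.Set.empty).map (fun s => s + x)))))
          PySem.Dict.empty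
        (new, seen))
      (PySem.Dict.empty.insert 0 (PySem.Set.ofList [0]), 0)
    PySem.Set.contains (st.1.getD n PySem.Set.empty) required_sum

-- ===== PRECONDITION & SPEC =====
def Spec_cherrypick (A : List Int) (n : Int) (required_sum : Int) (out : Bool) : Prop := out = cherrypick_alt A n required_sum
instance (A : List Int) (n : Int) (required_sum : Int) (out : Bool) : Decidable (Spec_cherrypick A n required_sum out) := by unfold Spec_cherrypick; infer_instance

-- ===== CLAIM (what is proved, stated in full; the proofs are below) =====
def Claim_equal_cherrypick : Prop := ∀ (A : List Int) (n : Int) (required_sum : Int), Dom_cherrypick A n required_sum → Spec_cherrypick A n required_sum (cherrypick A n required_sum)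

-- ===== LEMMAS AND PROOFS =====

-- the common specification: some sub-multiset of A with exactly n elements sums to required_sum
def HasPick (A : List Int) (n t : Int) : Prop :=
  ∃ T : Multiset Int, T ≤ (A : Multiset Int) ∧ (Multiset.card T : Int) = n ∧ T.sum = t

theorem recurse_iff (n t : Int) :
    ∀ (m : ℕ) (A : List Int), A.length ≤ m → ∀ (el : List Int) (cur : Int), cur ∈ A →
    ((recurse A n t el cur).fst = true ↔
      (((el.length : Int) = n ∧ el.sum = t) ∨
       ((el.length : Int) ≠ n ∧ ∃ T : Multiset Int, T ≤ ((A.erase cur : List Int) : Multiset Int) ∧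
          Multiset.card T + 1 < A.length ∧ ((el.length : Int) + 1 + Multiset.card T = n) ∧
          el.sum + cur + T.sum = t))) := by
  intro m
  induction m with
  | zero =>
    intro A h el cur hcur
    have : A = [] := List.eq_nil_of_length_eq_zero (Nat.le_zero.1 h)
    subst this
    cases hcur
  | succ m ih =>
    intro A hlen el cur hcur
    rw [recurse]
    by_cases hk : (el.length : Int) = n
    · rw [if_pos hk]
      simp only [decide_eq_true_eq, hk]
      tauto
    · have hA : A ≠ [] := List.ne_nil_of_mem hcur
      rw [if_neg hk, if_neg hA]
      have hrem := PySem.List.remove?_eq_some_erase (xs := A) (v := cur) hcur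
      have hBlen : (A.erase cur).length + 1 = A.length := by
        rw [List.length_erase_of_mem hcur]
        cases A with
        | nil => cases hcur
        | cons a l => simp
      -- reduce the dependent match on remove?
      have hred :
          (match h : PySem.List.remove? A cur with
           | none => (false, el)
           | some B =>
             if B.any (fun new_current => (recurse B n t (el ++ [cur]) new_current).fst) then
               (true, el)
             else
               (false, el)).fst = true ↔
          ((A.erase cur).any
            (fun new_current => (recurse (A.erase cur) n t (el ++ [cur]) new_current).fst)) = true := by
        split
        next heq =>
          rw [hrem] at heq
          simp at heq
        next B heq =>
          rw [hrem] at heq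
          injection heq with h2
          subst h2
          split_ifs with h1
          · simp [h1]
          · simp [h1]
      rw [hred, List.any_eq_true]
      have hstep : ∀ nc ∈ A.erase cur,
          ((recurse (A.erase cur) n t (el ++ [cur]) nc).fst = true ↔
            ((((el ++ [cur]).length : Int) = n ∧ (el ++ [cur]).sum = t) ∨
             (((el ++ [cur]).length : Int) ≠ n ∧ ∃ T : Multiset Int,
                T ≤ (((A.erase cur).erase nc : List Int) : Multiset Int) ∧
                Multiset.card T + 1 < (A.erase cur).length ∧
                (((el ++ [cur]).length : Int) + 1 + Multiset.card T = n) ∧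
                (el ++ [cur]).sum + nc + T.sum = t))) := by
        intro nc hnc
        exact ih (A.erase cur) (by omega) (el ++ [cur]) nc hnc
      constructor
      · rintro ⟨nc, hnc, hrec⟩
        rcases (hstep nc hnc).1 hrec with ⟨h1, h2⟩ | ⟨h1, T', hT', hc', hn', hs'⟩
        · -- T = 0 : the callee tested el ++ [cur] itself
          refine Or.inr ⟨hk, 0, Multiset.zero_le _, ?_, ?_, ?_⟩
          · have : 1 ≤ (A.erase cur).length := List.length_pos_of_mem hnc
            simp only [Multiset.card_zero]
            omega
          · simp only [Multiset.card_zero, Nat.cast_zero]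
            simp only [List.length_append, List.length_cons, List.length_nil] at h1
            push_cast at h1 ⊢
            omega
          · simp only [Multiset.sum_zero]
            simp only [List.sum_append, List.sum_cons, List.sum_nil] at h2
            omega
        · -- T = nc ::ₘ T'
          have hncB : nc ∈ ((A.erase cur : List Int) : Multiset Int) := by
            rw [Multiset.mem_coe]; exact hnc
          refine Or.inr ⟨hk, nc ::ₘ T', ?_, ?_, ?_, ?_⟩
          · rw [← Multiset.coe_erase] at hT'
            calc nc ::ₘ T' ≤ nc ::ₘ (((A.erase cur : List Int) : Multiset Int).erase nc) :=
                  Multiset.cons_le_cons nc hT'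
              _ = ((A.erase cur : List Int) : Multiset Int) := Multiset.cons_erase hncB
          · rw [Multiset.card_cons]; omega
          · rw [Multiset.card_cons]
            simp only [List.length_append, List.length_cons, List.length_nil] at hn'
            push_cast at hn' ⊢
            omega
          · rw [Multiset.sum_cons]
            simp only [List.sum_append, List.sum_cons, List.sum_nil] at hs'
            omega
      · rintro (⟨h1, -⟩ | ⟨-, T, hT, hc, hn', hs⟩)
        · exact absurd h1 hk
        · by_cases hT0 : T = 0
          · subst hT0
            obtain ⟨nc, hnc⟩ := List.exists_mem_of_length_pos (l := A.erase cur) (by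
              simp only [Multiset.card_zero] at hc; omega)
            refine ⟨nc, hnc, (hstep nc hnc).2 (Or.inl ⟨?_, ?_⟩)⟩
            · simp only [Multiset.card_zero, Nat.cast_zero] at hn'
              simp only [List.length_append, List.length_cons, List.length_nil]
              push_cast
              omega
            · simp only [Multiset.sum_zero] at hs
              simp only [List.sum_append, List.sum_cons, List.sum_nil]
              omega
          · obtain ⟨nc, hncT⟩ := Multiset.exists_mem_of_ne_zero hT0
            have hncB : nc ∈ A.erase cur := by
              rw [← Multiset.mem_coe]; exact Multiset.mem_of_le hT hncT
            have hcardT : 0 < Multiset.card T := Multiset.card_pos.2 hT0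
            have hTe : T.erase nc ≤ (((A.erase cur).erase nc : List Int) : Multiset Int) := by
              rw [← Multiset.coe_erase]
              exact Multiset.erase_le_erase nc hT
            have hcarde : Multiset.card (T.erase nc) + 1 = Multiset.card T :=
              Multiset.card_erase_add_one hncT
            have hsume : nc + (T.erase nc).sum = T.sum := by
              conv_rhs => rw [← Multiset.cons_erase hncT]
              rw [Multiset.sum_cons]
            refine ⟨nc, hncB, (hstep nc hncB).2 (Or.inr ⟨?_, T.erase nc, hTe, by omega, ?_, ?_⟩)⟩
            · simp only [List.length_append, List.length_cons, List.length_nil]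
              push_cast
              omega
            · simp only [List.length_append, List.length_cons, List.length_nil] at hn' ⊢
              push_cast at hn' ⊢
              omega
            · simp only [List.sum_append, List.sum_cons, List.sum_nil] at hs ⊢
              omega

theorem cherrypick_iff (A : List Int) (n t : Int) :
    cherrypick A n t = true ↔ HasPick A n t := by
  unfold cherrypick
  split_ifs with h1 h2
  · -- len(A) == n
    rw [decide_eq_true_eq]
    constructor
    · intro hs
      exact ⟨(A : Multiset Int), le_refl _, by rw [Multiset.coe_card]; exact h1, by simpa using hs⟩
    · rintro ⟨T, hT, hc, hs⟩
      have hTA : T = (A : Multiset Int) :=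
        Multiset.eq_of_le_of_card_le hT (by rw [Multiset.coe_card]; omega)
      subst hTA
      simpa using hs
  · -- len(A) - 1 == n
    rw [List.any_eq_true]
    constructor
    · rintro ⟨num, hnum, hmatch⟩
      rw [PySem.List.remove?_eq_some_erase (xs := A) (v := num) hnum] at hmatch
      have hm2 : decide ((A.erase num).sum = t) = true := hmatch
      rw [decide_eq_true_eq] at hm2
      have hpos : 1 ≤ A.length := List.length_pos_of_mem hnum
      refine ⟨((A.erase num : List Int) : Multiset Int), ?_, ?_, by simpa using hm2⟩
      · rw [← Multiset.coe_erase]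
        exact Multiset.erase_le num _
      · rw [Multiset.coe_card, List.length_erase_of_mem hnum]
        omega
    · rintro ⟨T, hT, hc, hs⟩
      have hcle : Multiset.card T ≤ A.length := by
        have := Multiset.card_le_card hT
        rwa [Multiset.coe_card] at this
      have hlen1 : 1 ≤ A.length := by omega
      have hcard : Multiset.card ((A : Multiset Int) - T) = 1 := by
        rw [Multiset.card_sub hT, Multiset.coe_card]
        omega
      obtain ⟨num, hnum⟩ := Multiset.card_eq_one.1 hcard
      have hmem : num ∈ (A : Multiset Int) := by
        have h3 : num ∈ (A : Multiset Int) - T := by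
          rw [hnum]; exact Multiset.mem_singleton_self num
        exact Multiset.mem_of_le (tsub_le_self) h3
      have hmemA : num ∈ A := Multiset.mem_coe.1 hmem
      have hsplit : (A : Multiset Int) = num ::ₘ T := by
        conv_lhs => rw [← Multiset.sub_add_cancel hT]
        rw [hnum, Multiset.singleton_add]
      have hAe : ((A.erase num : List Int) : Multiset Int) = T := by
        rw [← Multiset.coe_erase, hsplit, Multiset.erase_cons_head]
      refine ⟨num, hmemA, ?_⟩
      rw [PySem.List.remove?_eq_some_erase (xs := A) (v := num) hmemA]
      show decide ((A.erase num).sum = t) = true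
      rw [decide_eq_true_eq]
      have : ((A.erase num : List Int) : Multiset Int).sum = T.sum := by rw [hAe]
      simpa using this.trans hs
  · -- recursive branch
    rw [List.any_eq_true]
    constructor
    · rintro ⟨fc, hfc, hrec⟩
      rcases (recurse_iff n t A.length A le_rfl [] fc hfc).1 hrec with ⟨hn0, ht0⟩ | ⟨-, T, hT, hcd, hn', hs⟩
      · simp only [List.length_nil, Nat.cast_zero, List.sum_nil] at hn0 ht0
        refine ⟨0, Multiset.zero_le _, by simpa using hn0, by simpa using ht0⟩
      · have hfcm : fc ∈ (A : Multiset Int) := Multiset.mem_coe.2 hfc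
        rw [← Multiset.coe_erase] at hT
        refine ⟨fc ::ₘ T, ?_, ?_, ?_⟩
        · calc fc ::ₘ T ≤ fc ::ₘ ((A : Multiset Int).erase fc) := Multiset.cons_le_cons fc hT
            _ = (A : Multiset Int) := Multiset.cons_erase hfcm
        · rw [Multiset.card_cons]
          simp only [List.length_nil, Nat.cast_zero] at hn'
          push_cast
          omega
        · rw [Multiset.sum_cons]
          simp only [List.sum_nil] at hs
          omega
    · rintro ⟨T, hT, hc, hs⟩
      have hcle : Multiset.card T ≤ A.length := by
        have := Multiset.card_le_card hT
        rwa [Multiset.coe_card] at this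
      have hclt : Multiset.card T < A.length := by
        rcases Nat.lt_or_ge (Multiset.card T) A.length with h | h
        · exact h
        · exfalso; apply h1; omega
      by_cases hT0 : T = 0
      · subst hT0
        simp only [Multiset.card_zero, Nat.cast_zero] at hc
        simp only [Multiset.sum_zero] at hs
        obtain ⟨fc, hfc⟩ := List.exists_mem_of_length_pos (l := A) (by omega)
        refine ⟨fc, hfc, (recurse_iff n t A.length A le_rfl [] fc hfc).2 (Or.inl ⟨?_, ?_⟩)⟩
        · simp only [List.length_nil, Nat.cast_zero]; omega
        · simp only [List.sum_nil]; omega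
      · obtain ⟨fc, hfcT⟩ := Multiset.exists_mem_of_ne_zero hT0
        have hfcA : fc ∈ A := Multiset.mem_coe.1 (Multiset.mem_of_le hT hfcT)
        have hcardT : 0 < Multiset.card T := Multiset.card_pos.2 hT0
        have hTe : T.erase fc ≤ (((A.erase fc : List Int)) : Multiset Int) := by
          rw [← Multiset.coe_erase]
          exact Multiset.erase_le_erase fc hT
        have hcarde : Multiset.card (T.erase fc) + 1 = Multiset.card T :=
          Multiset.card_erase_add_one hfcT
        have hsume : fc + (T.erase fc).sum = T.sum := by
          conv_rhs => rw [← Multiset.cons_erase hfcT]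
          rw [Multiset.sum_cons]
        refine ⟨fc, hfcA, (recurse_iff n t A.length A le_rfl [] fc hfcA).2
          (Or.inr ⟨?_, T.erase fc, hTe, by omega, ?_, ?_⟩)⟩
        · simp only [List.length_nil, Nat.cast_zero]; omega
        · simp only [List.length_nil, Nat.cast_zero]; push_cast; omega
        · simp only [List.sum_nil]; omega

-- a fold that inserts distinct keys: getD afterwards
theorem getD_foldl_insert_keys (f : Int → PySem.Set Int) (cs : List Int) (hnd : cs.Nodup) :
    ∀ (d : PySem.Dict Int (PySem.Set Int)) (c : Int),
    ((cs.foldl (fun nw k => nw.insert k (f k)) d).getD c PySem.Set.empty) =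
      if c ∈ cs then f c else d.getD c PySem.Set.empty := by
  induction cs with
  | nil => intro d c; simp
  | cons c0 cs ihc =>
    intro d c
    rw [List.foldl_cons, ihc (List.nodup_cons.1 hnd).2, PySem.Dict.getD_insert]
    by_cases h1 : c ∈ cs
    · rw [if_pos h1, if_pos (List.mem_cons_of_mem c0 h1)]
    · rw [if_neg h1]
      by_cases h2 : c = c0
      · subst h2
        rw [if_pos rfl, if_pos (List.mem_cons_self ..)]
      · rw [if_neg h2, if_neg (by simp [h2, h1])]

theorem dp_inv (n : Int) (m : ℕ) (hn0 : 0 ≤ n) (hnm : n ≤ (m : Int)) :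
    ∀ (L : List Int) (sums : PySem.Dict Int (PySem.Set Int)) (M : Multiset Int),
    Multiset.card M + L.length = m →
    (∀ c s : Int, s ∈ sums.getD c PySem.Set.empty ↔
       (max 0 (n - ((m : Int) - (Multiset.card M : Int))) ≤ c ∧ c ≤ min ((Multiset.card M : Int)) n ∧
        ∃ T : Multiset Int, T ≤ M ∧ (Multiset.card T : Int) = c ∧ T.sum = s)) →
    ∀ c s : Int,
      s ∈ ((L.foldl
        (fun (st : PySem.Dict Int (PySem.Set Int) × Int) x =>
          let sums := st.1
          let seen := st.2 + 1
          let rem := (m : Int) - seen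
          let new := (PySem.List.pyRange (max 0 (n - rem)) (min seen n + 1) 1).foldl
            (fun new c => new.insert c
              (PySem.Set.union (sums.getD c PySem.Set.empty)
                (PySem.Set.ofList ((sums.getD (c - 1) PySem.Set.empty).map (fun s => s + x)))))
            PySem.Dict.empty
          (new, seen))
        (sums, (Multiset.card M : Int))).1.getD c PySem.Set.empty) ↔
      (n ≤ c ∧ c ≤ min (m : Int) n ∧
       ∃ T : Multiset Int, T ≤ M + (L : Multiset Int) ∧ (Multiset.card T : Int) = c ∧ T.sum = s) := by
  intro L
  induction L with
  | nil =>
    intro sums M htot hr c s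
    simp only [List.foldl_nil, List.length_nil, Nat.add_zero] at htot ⊢
    rw [hr c s]
    subst htot
    constructor
    · rintro ⟨h1, h2, hT⟩
      exact ⟨by omega, by omega, by simpa using hT⟩
    · rintro ⟨h1, h2, hT⟩
      exact ⟨by omega, by omega, by simpa using hT⟩
  | cons x L ih =>
    intro sums M htot hr c s
    rw [List.foldl_cons]
    have hnew : ∀ c s : Int,
        s ∈ (((PySem.List.pyRange (max 0 (n - ((m : Int) - ((Multiset.card M : Int) + 1))))
                (min ((Multiset.card M : Int) + 1) n + 1) 1).foldl
          (fun new c => new.insert c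
            (PySem.Set.union (sums.getD c PySem.Set.empty)
              (PySem.Set.ofList ((sums.getD (c - 1) PySem.Set.empty).map (fun s => s + x)))))
          PySem.Dict.empty).getD c PySem.Set.empty) ↔
        (max 0 (n - ((m : Int) - (Multiset.card (x ::ₘ M) : Int))) ≤ c ∧
         c ≤ min ((Multiset.card (x ::ₘ M) : Int)) n ∧
         ∃ T : Multiset Int, T ≤ x ::ₘ M ∧ (Multiset.card T : Int) = c ∧ T.sum = s) := by
      intro c s
      rw [getD_foldl_insert_keys _ _ (PySem.List.nodup_pyRange_one ..)]
      have hcardM1 : (Multiset.card (x ::ₘ M) : Int) = (Multiset.card M : Int) + 1 := by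
        rw [Multiset.card_cons]; push_cast; ring
      by_cases hin : c ∈ PySem.List.pyRange (max 0 (n - ((m : Int) - ((Multiset.card M : Int) + 1))))
          (min ((Multiset.card M : Int) + 1) n + 1) 1
      · rw [if_pos hin]
        rw [PySem.List.mem_pyRange_one] at hin
        rw [PySem.Set.mem_union, PySem.Set.mem_ofList]
        constructor
        · rintro (hold | hshift)
          · obtain ⟨hb1, hb2, T, hT, hcd, hsm⟩ := (hr c s).1 hold
            exact ⟨by omega, by omega, T, le_trans hT (Multiset.le_cons_self M x), hcd, hsm⟩
          · obtain ⟨s', hs', rfl⟩ := List.mem_map.1 hshift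
            obtain ⟨hb1, hb2, T, hT, hcd, hsm⟩ := (hr (c - 1) s').1 hs'
            refine ⟨by omega, by omega, x ::ₘ T, Multiset.cons_le_cons x hT, ?_, ?_⟩
            · rw [Multiset.card_cons]; push_cast; omega
            · rw [Multiset.sum_cons]; omega
        · rintro ⟨hb1, hb2, T, hT, hcd, hsm⟩
          rw [hcardM1] at hb1 hb2
          have hcle : Multiset.card T ≤ Multiset.card M + 1 := by
            have := Multiset.card_le_card hT
            rwa [Multiset.card_cons] at this
          by_cases hxT : x ∈ T
          · right
            have hT' : T.erase x ≤ M := Multiset.erase_le_iff_le_cons.2 hT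
            have hcard' : Multiset.card (T.erase x) + 1 = Multiset.card T :=
              Multiset.card_erase_add_one hxT
            have hsum' : x + (T.erase x).sum = T.sum := by
              conv_rhs => rw [← Multiset.cons_erase hxT]
              rw [Multiset.sum_cons]
            refine List.mem_map.2 ⟨(T.erase x).sum, ?_, by omega⟩
            refine (hr (c - 1) (T.erase x).sum).2 ⟨?_, ?_, T.erase x, hT', by omega, rfl⟩
            · omega
            · omega
          · left
            have hTM : T ≤ M := (Multiset.le_cons_of_notMem hxT).1 hT
            have hcle2 : Multiset.card T ≤ Multiset.card M := Multiset.card_le_card hTM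
            refine (hr c s).2 ⟨?_, ?_, T, hTM, hcd, hsm⟩
            · omega
            · push_cast at hcle2 ⊢; omega
      · rw [if_neg hin, PySem.Dict.getD_empty]
        rw [PySem.List.mem_pyRange_one] at hin
        simp only [PySem.Set.empty, List.not_mem_nil, false_iff, not_and]
        intro hb1 hb2
        rintro ⟨T, hT, hcd, hsm⟩
        rw [hcardM1] at hb1 hb2
        omega
    have htot' : Multiset.card (x ::ₘ M) + L.length = m := by
      rw [Multiset.card_cons]
      simp only [List.length_cons] at htot
      omega
    have hmain := ih ((PySem.List.pyRange (max 0 (n - ((m : Int) - ((Multiset.card M : Int) + 1))))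
                (min ((Multiset.card M : Int) + 1) n + 1) 1).foldl
          (fun new c => new.insert c
            (PySem.Set.union (sums.getD c PySem.Set.empty)
              (PySem.Set.ofList ((sums.getD (c - 1) PySem.Set.empty).map (fun s => s + x)))))
          PySem.Dict.empty) (x ::ₘ M) htot' hnew c s
    have hcast : ((Multiset.card (x ::ₘ M) : ℕ) : Int) = (Multiset.card M : Int) + 1 := by
      rw [Multiset.card_cons]; push_cast; ring
    rw [hcast] at hmain
    rw [hmain]
    have hco : (x ::ₘ M) + (L : Multiset Int) = M + ((x :: L : List Int) : Multiset Int) := by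
      rw [← Multiset.cons_coe, Multiset.add_cons, Multiset.cons_add]
    rw [hco]

theorem cherrypick_alt_iff (A : List Int) (n t : Int) :
    cherrypick_alt A n t = true ↔ HasPick A n t := by
  unfold cherrypick_alt
  split_ifs with hg
  · simp only [false_iff]
    rintro ⟨T, hT, hcard, hsum⟩
    have h1 : Multiset.card T ≤ Multiset.card (A : Multiset Int) := Multiset.card_le_card hT
    rw [Multiset.coe_card] at h1
    omega
  · simp only [not_or, not_lt] at hg
    obtain ⟨hn0, hnm⟩ := hg
    have base : ∀ c s : Int,
        s ∈ (PySem.Dict.empty.insert 0 (PySem.Set.ofList [(0 : Int)])).getD c PySem.Set.empty ↔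
        (max 0 (n - ((A.length : Int) - (Multiset.card (0 : Multiset Int) : Int))) ≤ c ∧
         c ≤ min ((Multiset.card (0 : Multiset Int) : Int)) n ∧
         ∃ T : Multiset Int, T ≤ (0 : Multiset Int) ∧ (Multiset.card T : Int) = c ∧ T.sum = s) := by
      intro c s
      rw [PySem.Dict.getD_insert]
      simp only [Multiset.card_zero, Nat.cast_zero, Multiset.le_zero]
      by_cases hc : c = 0
      · subst hc
        rw [if_pos rfl, PySem.Set.mem_ofList]
        simp only [List.mem_singleton]
        constructor
        · rintro rfl
          exact ⟨by omega, by omega, 0, rfl, by simp, by simp⟩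
        · rintro ⟨-, -, T, rfl, -, hs⟩
          simp only [Multiset.sum_zero] at hs
          omega
      · rw [if_neg hc, PySem.Dict.getD_empty]
        simp only [PySem.Set.empty, List.not_mem_nil, false_iff, not_and]
        intro _ h2
        exact absurd (by omega : c = 0) hc
    have hfold := dp_inv n A.length hn0 hnm A
      (PySem.Dict.empty.insert 0 (PySem.Set.ofList [(0 : Int)])) 0 (by simp) base n t
    simp only [Multiset.card_zero, Nat.cast_zero, Multiset.zero_add] at hfold
    rw [PySem.Set.contains_iff, hfold]
    unfold HasPick
    constructor
    · rintro ⟨-, -, hT⟩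
      exact hT
    · intro hT
      exact ⟨le_refl n, by omega, hT⟩

-- ===== VERDICT (by name: the statement is the Claim_ definition above) =====
theorem cherrypick_spec : Claim_equal_cherrypick := by
  intro A n t _
  unfold Spec_cherrypick
  rw [Bool.eq_iff_iff, cherrypick_iff, cherrypick_alt_iff]
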